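-- pv_equiv track=rewrite | github.com/NikolaosPourliakas/MASTER-THESIS-Python- | optimal_bridge_code.py | find_l2_set
-- ===== SOURCE A (Python) =====
-- def find_l2_set(poly, transition_points, L1_projection_points, vertical_line):
--
--     l2_set = set()
--
--     for vertex in poly:
--
--         l2_set.add(vertex)
--
--     for point in transition_points:
--
--         l2_set.add(point)
--
--     for projection_point in L1_projection_points:
--
--         l2_set.add(projection_point)
--
--     # Remove all occurrences of None from the l2_set in place
--     l2_set.difference_update({None})
--
--     # If the polygon is right of the vertical line, exclude vertices that have an edge left of them,
--     # meaning a pair of consecutive vertices that have lesser x-coordinate, and lesser-greater y-coordinate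
--
--     if (max(p[0] for p in poly) > vertical_line[0][0]):
--
--         tail_poly = poly[1:]
--         first_vertex = poly[0]
--
--         extended_poly = tail_poly + [first_vertex]
--         paired_vertices = zip(poly, extended_poly)
--
--         for v1, v2 in paired_vertices:
--
--             if (v1[0] == v2[0]):
--
--                excluded_vertices_condition = lambda v3: (v3[0] > v1[0]) and ( (v1[1] >= v3[1] >= v2[1]) or (v1[1] <= v3[1] <= v2[1]) )
--                excluded_vertices = {v3 for v3 in l2_set if excluded_vertices_condition(v3)}
--
--                l2_set -= excluded_vertices
--
--     # If the polygon is left of the vertical line, exclude vertices that have an edge right of them,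
--     # meaning a pair of consecutive vertices that have greater y-coordinate, and lesser-greater x-coordinate
--
--     elif (min(p[0] for p in poly) < vertical_line[0][0]):
--
--         tail_poly = poly[1:]
--         first_vertex = poly[0]
--
--         extended_poly = tail_poly + [first_vertex]
--         paired_vertices = zip(poly, extended_poly)
--
--         for v1, v2 in paired_vertices:
--
--             if (v1[0] == v2[0]):
--
--                 excluded_vertices_condition = lambda v3: (v3[0] < v1[0]) and ( (v1[1] >= v3[1] >= v2[1]) or (v1[1] <= v3[1] <= v2[1]) )
--                 excluded_vertices = {v3 for v3 in l2_set if excluded_vertices_condition(v3)}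
--
--                 l2_set -= excluded_vertices
--
--     return l2_set
-- ===== SOURCE B (Python) =====
-- def find_l2_set(poly, transition_points, L1_projection_points, vertical_line):
--     # One-pass reformulation: gather the candidate points once, gather the
--     # vertical edges once, then keep each candidate iff no vertical edge on the
--     # relevant side blocks it (per-edge removals are independent, so iterated
--     # set subtraction collapses to a single filter).
--     candidates = list(poly) \
--         + [p for p in transition_points if p is not None] \
--         + [p for p in L1_projection_points if p is not None]
--     x_line = vertical_line[0][0]
--     xs = [p[0] for p in poly]
--     edges = [(v1, v2) for v1, v2 in zip(poly, poly[1:] + poly[:1]) if v1[0] == v2[0]]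
--     if max(xs) > x_line:
--         side = 1
--     elif min(xs) < x_line:
--         side = -1
--     else:
--         side = 0
--
--     def blocked(p):
--         return side != 0 and any(
--             side * (p[0] - v1[0]) > 0
--             and min(v1[1], v2[1]) <= p[1] <= max(v1[1], v2[1])
--             for v1, v2 in edges)
--
--     return {p for p in candidates if not blocked(p)}
-- ===== Notes on version B (the rewrite author's own statement) =====
-- stated objective: alternative
-- what changed: A iteratively mutates a set, subtracting a freshly built exclusion set per vertical edge; B collects candidates and vertical edges once and keeps each candidate with a single 'blocked by any edge on the chosen side' filter pass.
import Mathlib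
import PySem

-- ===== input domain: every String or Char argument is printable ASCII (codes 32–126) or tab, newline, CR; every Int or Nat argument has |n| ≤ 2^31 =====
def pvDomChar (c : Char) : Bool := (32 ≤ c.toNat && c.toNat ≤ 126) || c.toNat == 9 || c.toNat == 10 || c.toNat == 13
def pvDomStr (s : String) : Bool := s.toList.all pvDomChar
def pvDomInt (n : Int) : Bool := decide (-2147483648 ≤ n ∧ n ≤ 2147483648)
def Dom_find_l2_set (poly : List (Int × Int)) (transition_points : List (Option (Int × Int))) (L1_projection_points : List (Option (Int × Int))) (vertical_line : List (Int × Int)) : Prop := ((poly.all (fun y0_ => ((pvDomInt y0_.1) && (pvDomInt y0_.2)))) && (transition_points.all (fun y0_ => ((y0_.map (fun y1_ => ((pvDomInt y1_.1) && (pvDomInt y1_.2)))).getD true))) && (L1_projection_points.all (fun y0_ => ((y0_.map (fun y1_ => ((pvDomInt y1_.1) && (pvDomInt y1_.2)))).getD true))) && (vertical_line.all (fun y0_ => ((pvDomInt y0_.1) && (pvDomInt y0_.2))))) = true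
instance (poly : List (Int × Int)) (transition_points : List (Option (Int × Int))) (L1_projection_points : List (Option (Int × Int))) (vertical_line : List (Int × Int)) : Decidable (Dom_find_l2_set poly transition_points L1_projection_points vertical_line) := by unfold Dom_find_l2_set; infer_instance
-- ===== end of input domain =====

-- B replaces A's per-edge iterated set subtraction by collecting the vertical
-- edges once and keeping each candidate point with a single "blocked by some
-- edge on the chosen side" filter pass (objective: alternative decomposition).

-- ===== PORT A =====
-- A's exclusion lambdas, applied to set elements.  The element type is
-- Option (Int × Int) because Python's set holds None until
-- difference_update({None}); when these lambdas run None is already removed,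
-- so the none branch is unreachable.
def pvCondR (v1 v2 : Int × Int) (v3o : Option (Int × Int)) : Bool :=
  match v3o with
  | none => false
  | some v3 => decide (v3.1 > v1.1) &&
      ((decide (v1.2 ≥ v3.2) && decide (v3.2 ≥ v2.2)) || (decide (v1.2 ≤ v3.2) && decide (v3.2 ≤ v2.2)))

def pvCondL (v1 v2 : Int × Int) (v3o : Option (Int × Int)) : Bool :=
  match v3o with
  | none => false
  | some v3 => decide (v3.1 < v1.1) &&
      ((decide (v1.2 ≥ v3.2) && decide (v3.2 ≥ v2.2)) || (decide (v1.2 ≤ v3.2) && decide (v3.2 ≤ v2.2)))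

-- one iteration of A's exclusion loop (right / left branch)
def pvStepR (s : PySem.Set (Option (Int × Int))) (vv : (Int × Int) × (Int × Int)) : PySem.Set (Option (Int × Int)) :=
  if vv.1.1 == vv.2.1 then
    PySem.Set.diff s (PySem.Set.ofList (s.filter (pvCondR vv.1 vv.2)))
  else s

def pvStepL (s : PySem.Set (Option (Int × Int))) (vv : (Int × Int) × (Int × Int)) : PySem.Set (Option (Int × Int)) :=
  if vv.1.1 == vv.2.1 then
    PySem.Set.diff s (PySem.Set.ofList (s.filter (pvCondL vv.1 vv.2)))
  else s

def find_l2_set (poly : List (Int × Int)) (transition_points : List (Option (Int × Int))) (L1_projection_points : List (Option (Int × Int))) (vertical_line : List (Int × Int)) : List (Int × Int) :=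
  let l2a : PySem.Set (Option (Int × Int)) :=
    poly.foldl (fun s vertex => PySem.Set.add s (some vertex)) PySem.Set.empty
  let l2b := transition_points.foldl (fun s point => PySem.Set.add s point) l2a
  let l2c := L1_projection_points.foldl (fun s pp => PySem.Set.add s pp) l2b
  -- l2_set.difference_update({None})
  let l2 := PySem.Set.diff l2c (PySem.Set.ofList [(none : Option (Int × Int))])
  match poly, vertical_line with
  | v0 :: tailp, vl0 :: _ =>
    let final :=
      if (tailp.map Prod.fst).foldl max v0.1 > vl0.1 then
        -- paired_vertices = zip(poly, poly[1:] + [poly[0]])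
        (List.zip (v0 :: tailp) (tailp ++ [v0])).foldl pvStepR l2
      else if (tailp.map Prod.fst).foldl min v0.1 < vl0.1 then
        (List.zip (v0 :: tailp) (tailp ++ [v0])).foldl pvStepL l2
      else l2
    -- None has been removed from the set, so returning it as a set of pairs
    -- is exactly filterMap id
    final.filterMap id
  | _, _ => []  -- Python raises here (max() of empty poly / IndexError on empty vertical_line); excluded by Pre_

-- ===== PORT B =====
def find_l2_set_alt (poly : List (Int × Int)) (transition_points : List (Option (Int × Int))) (L1_projection_points : List (Option (Int × Int))) (vertical_line : List (Int × Int)) : List (Int × Int) :=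
  let candidates := poly ++ transition_points.filterMap id ++ L1_projection_points.filterMap id
  -- vertical_line[0] via pyGet? (none = IndexError, excluded by Pre_)
  match PySem.List.pyGet? vertical_line 0 with
  | none => []  -- Python raises IndexError; excluded by Pre_
  | some vl0 =>
    match poly with
    | [] => []  -- Python raises ValueError (max of empty); excluded by Pre_
    | v0 :: tailp =>
      let edges := (List.zip (v0 :: tailp) (tailp ++ [v0])).filter (fun vv => vv.1.1 == vv.2.1)
      let side : Int :=
        if (tailp.map Prod.fst).foldl max v0.1 > vl0.1 then 1
        else if (tailp.map Prod.fst).foldl min v0.1 < vl0.1 then -1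
        else 0
      let blocked : Int × Int → Bool := fun p =>
        decide (side ≠ 0) && edges.any (fun vv =>
          decide (side * (p.1 - vv.1.1) > 0) &&
          decide (min vv.1.2 vv.2.2 ≤ p.2) && decide (p.2 ≤ max vv.1.2 vv.2.2))
      PySem.Set.ofList (candidates.filter (fun p => !(blocked p)))

-- ===== PRECONDITION & SPEC =====
-- Pre_ excludes exactly the inputs on which the Python A raises: empty poly
-- (ValueError from max() of an empty generator) or empty vertical_line
-- (IndexError on vertical_line[0]).
def Pre_find_l2_set (poly : List (Int × Int)) (transition_points : List (Option (Int × Int))) (L1_projection_points : List (Option (Int × Int))) (vertical_line : List (Int × Int)) : Prop :=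
  poly ≠ [] ∧ vertical_line ≠ []
instance (poly : List (Int × Int)) (transition_points : List (Option (Int × Int))) (L1_projection_points : List (Option (Int × Int))) (vertical_line : List (Int × Int)) : Decidable (Pre_find_l2_set poly transition_points L1_projection_points vertical_line) := by unfold Pre_find_l2_set; infer_instance

def pvWitness_find_l2_set : (List (Int × Int)) × (List (Option (Int × Int))) × (List (Option (Int × Int))) × (List (Int × Int)) :=
  ([(2, 0), (2, 3)], [some (4, 1), none], [none, some (0, 2)], [(1, 0)])

def Spec_find_l2_set (poly : List (Int × Int)) (transition_points : List (Option (Int × Int))) (L1_projection_points : List (Option (Int × Int))) (vertical_line : List (Int × Int)) (out : List (Int × Int)) : Prop := out = find_l2_set_alt poly transition_points L1_projection_points vertical_line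
instance (poly : List (Int × Int)) (transition_points : List (Option (Int × Int))) (L1_projection_points : List (Option (Int × Int))) (vertical_line : List (Int × Int)) (out : List (Int × Int)) : Decidable (Spec_find_l2_set poly transition_points L1_projection_points vertical_line out) := by unfold Spec_find_l2_set; infer_instance

-- ===== CLAIM (what is proved, stated in full; the proofs are below) =====
def Claim_equal_find_l2_set : Prop := ∀ (poly : List (Int × Int)) (transition_points : List (Option (Int × Int))) (L1_projection_points : List (Option (Int × Int))) (vertical_line : List (Int × Int)), Dom_find_l2_set poly transition_points L1_projection_points vertical_line → Pre_find_l2_set poly transition_points L1_projection_points vertical_line → Spec_find_l2_set poly transition_points L1_projection_points vertical_line (find_l2_set poly transition_points L1_projection_points vertical_line)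

-- ===== LEMMAS AND PROOFS =====

-- set(...) built from a filtered list is the filtered set (first occurrences)
theorem pv_ofList_filter {α : Type} [BEq α] [LawfulBEq α] (q : α → Bool) (l : List α) :
    PySem.Set.ofList (l.filter q) = (PySem.Set.ofList l).filter q := by
  induction l with
  | nil => rfl
  | cons x xs ih =>
    by_cases hq : q x = true
    · rw [List.filter_cons_of_pos hq, PySem.Set.ofList_cons, PySem.Set.ofList_cons, ih,
        List.filter_cons_of_pos hq]
      simp only [PySem.Set.discard, List.filter_filter]
      exact congrArg _ (List.filter_congr (fun y _ => by rw [Bool.and_comm]))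
    · rw [List.filter_cons_of_neg hq, PySem.Set.ofList_cons, ih, List.filter_cons_of_neg hq]
      simp only [PySem.Set.discard, List.filter_filter]
      refine List.filter_congr (fun y _ => ?_)
      by_cases hy : y = x
      · subst hy; simp [hq]
      · simp [hy]

-- filtering out the None element of a set of options leaves the somes, in order
theorem pv_aux_none {α : Type} [BEq α] [LawfulBEq α] (L : List (Option α)) :
    (PySem.Set.ofList L).filter (fun x => !(x == (none : Option α)))
      = (PySem.Set.ofList (L.filterMap id)).map some := by
  induction L with
  | nil => rfl
  | cons x xs ih =>
    cases x with
    | none =>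
      rw [PySem.Set.ofList_cons, List.filter_cons_of_neg (by simp), PySem.Set.discard,
        List.filter_filter]
      rw [show (List.filterMap id (none :: xs)) = List.filterMap id xs from by simp, ← ih]
      exact List.filter_congr (fun y _ => by rcases y <;> simp)
    | some a =>
      rw [PySem.Set.ofList_cons, List.filter_cons_of_pos (by simp), PySem.Set.discard,
        List.filter_filter,
        show (List.filterMap id (some a :: xs)) = a :: List.filterMap id xs from by simp,
        PySem.Set.ofList_cons, List.map_cons, PySem.Set.discard]
      congr 1
      rw [← List.filter_filter, List.filter_comm, ih, List.filter_map]
      congr 1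

-- l2_set.difference_update({None}) on the built set, as diff
theorem pv_diff_none {α : Type} [BEq α] [LawfulBEq α] (L : List (Option α)) :
    PySem.Set.diff (PySem.Set.ofList L) (PySem.Set.ofList [(none : Option α)])
      = (PySem.Set.ofList (L.filterMap id)).map some := by
  rw [← pv_aux_none]
  unfold PySem.Set.diff
  refine List.filter_congr (fun y _ => ?_)
  congr 1
  rcases y <;> simp [PySem.Set.contains, PySem.Set.ofList]

-- one step of A's loop: subtracting the comprehension over s is a filter of s
theorem pv_diff_self_filter {α : Type} [BEq α] [LawfulBEq α] (s : List α) (c : α → Bool) :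
    PySem.Set.diff s (PySem.Set.ofList (s.filter c)) = s.filter (fun x => !(c x)) := by
  unfold PySem.Set.diff
  refine List.filter_congr (fun x hx => ?_)
  have : PySem.Set.contains (PySem.Set.ofList (s.filter c)) x = c x := by
    rcases h : c x <;> simp [PySem.Set.contains, List.mem_filter, hx, h]
  rw [this]

-- A's whole exclusion loop collapses to a single filter
theorem pv_foldl_diff {α β : Type} [BEq α] [LawfulBEq α] (E : List β) (g : β → Bool)
    (c : β → α → Bool) (s : List α) :
    E.foldl (fun s e =>
        if g e then PySem.Set.diff s (PySem.Set.ofList (s.filter (c e))) else s) s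
      = s.filter (fun x => !((E.filter g).any (fun e => c e x))) := by
  induction E generalizing s with
  | nil => simp
  | cons e E ih =>
    rcases hg : g e
    · rw [List.foldl_cons, if_neg (by simp [hg]), ih, List.filter_cons_of_neg (by simp [hg])]
    · rw [List.foldl_cons, if_pos (by simp [hg]), pv_diff_self_filter, ih,
        List.filter_cons_of_pos (by simp [hg]), List.filter_filter]
      refine List.filter_congr (fun x _ => ?_)
      simp [Bool.and_comm]

theorem pv_foldl_stepR (E : List ((Int × Int) × (Int × Int))) (s : PySem.Set (Option (Int × Int))) :
    E.foldl pvStepR s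
      = s.filter (fun x => !((E.filter (fun vv => vv.1.1 == vv.2.1)).any (fun e => pvCondR e.1 e.2 x))) := by
  unfold pvStepR
  exact pv_foldl_diff E (fun vv => vv.1.1 == vv.2.1) (fun e => pvCondR e.1 e.2) s

theorem pv_foldl_stepL (E : List ((Int × Int) × (Int × Int))) (s : PySem.Set (Option (Int × Int))) :
    E.foldl pvStepL s
      = s.filter (fun x => !((E.filter (fun vv => vv.1.1 == vv.2.1)).any (fun e => pvCondL e.1 e.2 x))) := by
  unfold pvStepL
  exact pv_foldl_diff E (fun vv => vv.1.1 == vv.2.1) (fun e => pvCondL e.1 e.2) s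

-- filtering a mapped-some set and then dropping the option layer
theorem pv_filterMap_filter_map_some {α : Type} (M : List α) (F : Option α → Bool) :
    ((M.map some).filter F).filterMap id = M.filter (fun p => F (some p)) := by
  rw [List.filter_map, List.filterMap_map]
  simp [Function.comp_def]

-- A's first three loops build set(poly-as-some ++ transition ++ projection)
theorem pv_build (poly : List (Int × Int)) (tps l1s : List (Option (Int × Int))) :
    l1s.foldl (fun s pp => PySem.Set.add s pp)
      (tps.foldl (fun s point => PySem.Set.add s point)
        (poly.foldl (fun s vertex => PySem.Set.add s (some vertex)) PySem.Set.empty))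
      = PySem.Set.ofList ((poly.map some ++ tps) ++ l1s) := by
  unfold PySem.Set.ofList
  rw [List.foldl_append, List.foldl_append, List.foldl_map]

-- A's exclusion lambdas equal B's side/min/max formulation, per edge and point
theorem pv_condR_eq (v1 v2 p : Int × Int) :
    pvCondR v1 v2 (some p)
      = (decide ((1 : Int) * (p.1 - v1.1) > 0) &&
         decide (min v1.2 v2.2 ≤ p.2) && decide (p.2 ≤ max v1.2 v2.2)) := by
  simp only [pvCondR, ← Bool.decide_and, ← Bool.decide_or, decide_eq_decide]
  omega

theorem pv_condL_eq (v1 v2 p : Int × Int) :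
    pvCondL v1 v2 (some p)
      = (decide ((-1 : Int) * (p.1 - v1.1) > 0) &&
         decide (min v1.2 v2.2 ≤ p.2) && decide (p.2 ≤ max v1.2 v2.2)) := by
  simp only [pvCondL, ← Bool.decide_and, ← Bool.decide_or, decide_eq_decide]
  omega

-- ===== VERDICT (by name: the statement is the Claim_ definition above) =====
theorem find_l2_set_spec : Claim_equal_find_l2_set := by
  intro poly tps l1s vl _ hpre
  obtain ⟨hp, hv⟩ := hpre
  unfold Spec_find_l2_set
  cases poly with
  | nil => exact absurd rfl hp
  | cons v0 tailp =>
    cases vl with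
    | nil => exact absurd rfl hv
    | cons vl0 vt =>
      simp only [find_l2_set, find_l2_set_alt, PySem.List.pyGet?_zero_cons]
      have hC : ((List.map some (v0 :: tailp) ++ tps) ++ l1s).filterMap id
          = (v0 :: tailp) ++ tps.filterMap id ++ l1s.filterMap id := by
        simp [List.filterMap_append, List.filterMap_map]
      by_cases hmax : (tailp.map Prod.fst).foldl max v0.1 > vl0.1
      · rw [if_pos hmax, if_pos hmax, pv_build, pv_diff_none, hC, pv_foldl_stepR,
          pv_filterMap_filter_map_some, pv_ofList_filter]
        refine (List.filter_congr (fun p _ => ?_)).symm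
        simp only [pv_condR_eq]
        simp
      · by_cases hmin : (tailp.map Prod.fst).foldl min v0.1 < vl0.1
        · rw [if_neg hmax, if_neg hmax, if_pos hmin, if_pos hmin, pv_build, pv_diff_none, hC,
            pv_foldl_stepL, pv_filterMap_filter_map_some, pv_ofList_filter]
          refine (List.filter_congr (fun p _ => ?_)).symm
          simp only [pv_condL_eq]
          simp
        · rw [if_neg hmax, if_neg hmax, if_neg hmin, if_neg hmin, pv_build, pv_diff_none, hC]
          simp [List.filterMap_map]
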